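-- pv_equiv track=rewrite | github.com/nikfuzz/DataStructures_Algorithms | dynamic_programming_1D/Maximum_Sum.py | solve
-- ===== SOURCE A (Python) =====
-- def solve(a, b, c, d):
--     dp = [0]*len(a)
--     dp[0] = b*a[0]
--     for i in range(1,len(a)):
--         dp[i] = max(b*a[i], dp[i-1])
--
--     for i in range(1,len(a)):
--         dp[i] = max(b*a[i], dp[i-1])
--     dp[0] = dp[0] + a[0]*c
--     for i in range(1,len(a)):
--         dp[i] = max(c*a[i]+dp[i], dp[i-1])
--
--     dp[0] = dp[0] + a[0]*d
--     for i in range(1,len(a)):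
--         dp[i] = max(d*a[i]+dp[i], dp[i-1])
--     return dp[-1]
-- ===== SOURCE B (Python) =====
-- def solve(a, b, c, d):
--     # Single forward pass with three scalars instead of a dp array and four passes.
--     b1 = b * a[0]
--     b2 = b1 + c * a[0]
--     b3 = b2 + d * a[0]
--     for x in a[1:]:
--         b1 = max(b1, b * x)
--         b2 = max(b2, c * x + b1)
--         b3 = max(b3, d * x + b2)
--     return b3
-- ===== Notes on version B (the rewrite author's own statement) =====
-- stated objective: faster
-- what changed: Replaces the dp array with its four sequential array passes by a single forward pass maintaining three scalar running maxima (best b-sum, best b,c-sum, best b,c,d-sum), updated in order at each element.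
import Mathlib
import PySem

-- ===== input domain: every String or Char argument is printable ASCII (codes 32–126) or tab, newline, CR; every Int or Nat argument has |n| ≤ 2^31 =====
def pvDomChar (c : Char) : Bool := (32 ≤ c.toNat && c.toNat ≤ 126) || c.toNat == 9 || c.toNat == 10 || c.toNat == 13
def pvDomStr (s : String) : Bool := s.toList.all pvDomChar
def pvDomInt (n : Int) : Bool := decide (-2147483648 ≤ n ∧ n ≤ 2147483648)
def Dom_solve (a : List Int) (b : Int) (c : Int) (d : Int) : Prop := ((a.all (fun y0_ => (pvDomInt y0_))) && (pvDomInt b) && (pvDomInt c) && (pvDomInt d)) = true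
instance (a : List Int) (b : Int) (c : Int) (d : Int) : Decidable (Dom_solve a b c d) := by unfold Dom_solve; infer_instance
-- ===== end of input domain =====

-- B replaces A's dp array and its four sequential passes by a single forward pass
-- over three scalar running maxima (objective: one pass, O(1) extra space).

-- ===== PORT A =====
-- Every index A uses is in range on Pre_ (a ≠ []): a[i] and dp[i] for i in
-- range(1,len(a)) and dp[0] are ported with getD/set on the Nat index (exact there);
-- dp[-1] via PySem.List.pyGet? (some _ on Pre_).
def solve (a : List Int) (b : Int) (c : Int) (d : Int) : Int :=
  let n : Int := a.length
  let dp : List Int := List.replicate a.length 0          -- dp = [0]*len(a)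
  let dp := dp.set 0 (b * a.getD 0 0)                     -- dp[0] = b*a[0]
  let dp := (PySem.List.pyRange 1 n 1).foldl (fun dp i =>
      dp.set i.toNat (max (b * a.getD i.toNat 0) (dp.getD (i.toNat - 1) 0))) dp
  let dp := (PySem.List.pyRange 1 n 1).foldl (fun dp i =>
      dp.set i.toNat (max (b * a.getD i.toNat 0) (dp.getD (i.toNat - 1) 0))) dp
  let dp := dp.set 0 (dp.getD 0 0 + a.getD 0 0 * c)       -- dp[0] = dp[0] + a[0]*c
  let dp := (PySem.List.pyRange 1 n 1).foldl (fun dp i =>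
      dp.set i.toNat (max (c * a.getD i.toNat 0 + dp.getD i.toNat 0) (dp.getD (i.toNat - 1) 0))) dp
  let dp := dp.set 0 (dp.getD 0 0 + a.getD 0 0 * d)       -- dp[0] = dp[0] + a[0]*d
  let dp := (PySem.List.pyRange 1 n 1).foldl (fun dp i =>
      dp.set i.toNat (max (d * a.getD i.toNat 0 + dp.getD i.toNat 0) (dp.getD (i.toNat - 1) 0))) dp
  (PySem.List.pyGet? dp (-1)).getD 0                      -- dp[-1]

-- ===== PORT B =====
def solve_alt (a : List Int) (b : Int) (c : Int) (d : Int) : Int :=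
  let a0 := a.getD 0 0                                    -- a[0]; in range on Pre_
  let b1 := b * a0
  let b2 := b1 + c * a0
  let b3 := b2 + d * a0
  let r := (a.drop 1).foldl (fun (s : Int × Int × Int) x =>
      let b1 := max s.1 (b * x)
      let b2 := max s.2.1 (c * x + b1)
      let b3 := max s.2.2 (d * x + b2)
      (b1, b2, b3)) (b1, b2, b3)
  r.2.2

-- ===== PRECONDITION & SPEC =====
-- A indexes a[0] unconditionally, so it raises IndexError exactly on the empty list.
def Pre_solve (a : List Int) (b : Int) (c : Int) (d : Int) : Prop := a ≠ []
instance (a : List Int) (b : Int) (c : Int) (d : Int) : Decidable (Pre_solve a b c d) := by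
  unfold Pre_solve; infer_instance
def pvWitness_solve : List Int × Int × Int × Int := ([3, -1, 4, -2, 5], 2, -3, 1)

def Spec_solve (a : List Int) (b : Int) (c : Int) (d : Int) (out : Int) : Prop := out = solve_alt a b c d
instance (a : List Int) (b : Int) (c : Int) (d : Int) (out : Int) : Decidable (Spec_solve a b c d out) := by
  unfold Spec_solve; infer_instance

-- ===== CLAIM (what is proved, stated in full; the proofs are below) =====
def Claim_equal_solve : Prop := ∀ (a : List Int) (b : Int) (c : Int) (d : Int), Dom_solve a b c d → Pre_solve a b c d → Spec_solve a b c d (solve a b c d)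

-- ===== LEMMAS AND PROOFS =====
def passF (f : Nat → Int → Int → Int) : List Int → Int → List Int :=
  fun dp i => dp.set i.toNat (f i.toNat (dp.getD i.toNat 0) (dp.getD (i.toNat - 1) 0))

def passL (f : Nat → Int → Int → Int) (n : Int) (dp : List Int) : List Int :=
  (PySem.List.pyRange 1 n 1).foldl (passF f) dp

def passG (f : Nat → Int → Int → Int) (dp : List Int) : Nat → Int
  | 0 => dp.getD 0 0
  | i + 1 => f (i + 1) (dp.getD (i + 1) 0) (passG f dp i)

theorem passL_spec (f : Nat → Int → Int → Int) (dp : List Int) (n : Nat) (hn : n ≤ dp.length) :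
    (passL f (n : Int) dp).length = dp.length ∧
    (∀ i : Nat, i < n → (passL f (n : Int) dp).getD i 0 = passG f dp i) ∧
    (∀ i : Nat, n ≤ i → (passL f (n : Int) dp).getD i 0 = dp.getD i 0) := by
  induction n with
  | zero =>
    have : passL f 0 dp = dp := by
      unfold passL
      rw [PySem.List.pyRange_one_eq_nil (by norm_num)]
      rfl
    simp [this]
  | succ n ih =>
    cases n with
    | zero =>
      have : passL f 1 dp = dp := by
        unfold passL
        rw [PySem.List.pyRange_one_eq_nil (by norm_num)]
        rfl
      refine ⟨by simp [this], ?_, by intro i hi; simp [this]⟩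
      intro i hi
      interval_cases i
      simp [this, passG]
    | succ m =>
      obtain ⟨hlen, hlt, hge⟩ := ih (by omega)
      have key : passL f ((m + 1 + 1 : Nat) : Int) dp =
          (passL f ((m + 1 : Nat) : Int) dp).set (m + 1)
            (f (m + 1) ((passL f ((m + 1 : Nat) : Int) dp).getD (m + 1) 0)
              ((passL f ((m + 1 : Nat) : Int) dp).getD m 0)) := by
        unfold passL
        have h1 : ((m + 1 + 1 : Nat) : Int) = ((m + 1 : Nat) : Int) + 1 := by push_cast; ring
        rw [h1, PySem.List.pyRange_one_succ_right (by push_cast; omega), List.foldl_append]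
        simp [passF]
      push_cast at key hlen hlt hge ⊢
      refine ⟨?_, ?_, ?_⟩
      · rw [key, List.length_set, hlen]
      · intro i hi
        rcases Nat.lt_or_ge i (m + 1) with h | h
        · rw [key]
          rw [List.getD_eq_getElem?_getD, List.getElem?_set_ne (by omega), ← List.getD_eq_getElem?_getD]
          exact hlt i h
        · have hi' : i = m + 1 := by omega
          subst hi'
          rw [key, List.getD_eq_getElem?_getD, List.getElem?_set_self (by omega),
            Option.getD_some]
          rw [hge (m + 1) (le_refl _), hlt m (by omega)]
          rfl
      · intro i hi
        rw [key, List.getD_eq_getElem?_getD, List.getElem?_set_ne (by omega),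
          ← List.getD_eq_getElem?_getD]
        exact hge i (by omega)

def g1 (a : List Int) (b : Int) : Nat → Int
  | 0 => b * a.getD 0 0
  | i + 1 => max (b * a.getD (i + 1) 0) (g1 a b i)
def g2 (a : List Int) (b : Int) (c : Int) : Nat → Int
  | 0 => b * a.getD 0 0 + c * a.getD 0 0
  | i + 1 => max (c * a.getD (i + 1) 0 + g1 a b (i + 1)) (g2 a b c i)
def g3 (a : List Int) (b : Int) (c : Int) (d : Int) : Nat → Int
  | 0 => b * a.getD 0 0 + c * a.getD 0 0 + d * a.getD 0 0
  | i + 1 => max (d * a.getD (i + 1) 0 + g2 a b c (i + 1)) (g3 a b c d i)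

theorem set_getD_zero (l : List Int) (v : Int) (h : 0 < l.length) : (l.set 0 v).getD 0 0 = v := by
  rw [List.getD_eq_getElem?_getD, List.getElem?_set_self (by omega), Option.getD_some]

theorem set_getD_succ (l : List Int) (v : Int) (i : Nat) :
    (l.set 0 v).getD (i + 1) 0 = l.getD (i + 1) 0 := by
  rw [List.getD_eq_getElem?_getD, List.getElem?_set_ne (by omega), ← List.getD_eq_getElem?_getD]

theorem solve_eq_g3 (a : List Int) (b c d : Int) (h : a ≠ []) :
    solve a b c d = g3 a b c d (a.length - 1) := by
  have hn : 0 < a.length := List.length_pos_iff.mpr h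
  set f1 : Nat → Int → Int → Int := fun i _ prev => max (b * a.getD i 0) prev with hf1
  set f3 : Nat → Int → Int → Int := fun i old prev => max (c * a.getD i 0 + old) prev with hf3
  set f4 : Nat → Int → Int → Int := fun i old prev => max (d * a.getD i 0 + old) prev with hf4
  set dp0 := (List.replicate a.length 0).set 0 (b * a.getD 0 0) with hdp0
  set dp1 := passL f1 (a.length : Int) dp0 with hdp1
  set dp2 := passL f1 (a.length : Int) dp1 with hdp2
  set dp2' := dp2.set 0 (dp2.getD 0 0 + a.getD 0 0 * c) with hdp2'
  set dp3 := passL f3 (a.length : Int) dp2' with hdp3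
  set dp3' := dp3.set 0 (dp3.getD 0 0 + a.getD 0 0 * d) with hdp3'
  set dp4 := passL f4 (a.length : Int) dp3' with hdp4
  have hform : solve a b c d = (PySem.List.pyGet? dp4 (-1)).getD 0 := rfl
  -- lengths
  have l0 : dp0.length = a.length := by simp [hdp0]
  obtain ⟨l1, e1, _⟩ := passL_spec f1 dp0 a.length (by omega)
  rw [← hdp1] at l1 e1
  rw [l0] at l1
  obtain ⟨l2, e2, _⟩ := passL_spec f1 dp1 a.length (by omega)
  rw [← hdp2] at l2 e2
  rw [l1] at l2
  have l2' : dp2'.length = a.length := by simp [hdp2', l2]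
  obtain ⟨l3, e3, _⟩ := passL_spec f3 dp2' a.length (by omega)
  rw [← hdp3] at l3 e3
  rw [l2'] at l3
  have l3' : dp3'.length = a.length := by simp [hdp3', l3]
  obtain ⟨l4, e4, _⟩ := passL_spec f4 dp3' a.length (by omega)
  rw [← hdp4] at l4 e4
  rw [l3'] at l4
  -- stage 1: passG f1 dp0 = g1
  have G1 : ∀ i, passG f1 dp0 i = g1 a b i := by
    intro i
    induction i with
    | zero =>
      show dp0.getD 0 0 = b * a.getD 0 0
      rw [hdp0, set_getD_zero _ _ (by simpa using hn)]
    | succ i ih => simp only [passG]; rw [ih]; rfl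
  have E1 : ∀ i, i < a.length → dp1.getD i 0 = g1 a b i := fun i hi => (e1 i hi).trans (G1 i)
  have G2 : ∀ i, passG f1 dp1 i = g1 a b i := by
    intro i
    induction i with
    | zero => show dp1.getD 0 0 = g1 a b 0; exact E1 0 hn
    | succ i ih => simp only [passG]; rw [ih]; rfl
  have E2 : ∀ i, i < a.length → dp2.getD i 0 = g1 a b i := fun i hi => (e2 i hi).trans (G2 i)
  -- stage 2'
  have E20 : dp2'.getD 0 0 = g2 a b c 0 := by
    rw [hdp2', set_getD_zero _ _ (by omega), E2 0 hn]
    simp [g1, g2]; ring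
  have E2S : ∀ i, i + 1 < a.length → dp2'.getD (i + 1) 0 = g1 a b (i + 1) := by
    intro i hi
    rw [hdp2', set_getD_succ, E2 (i + 1) hi]
  have G3 : ∀ i, i < a.length → passG f3 dp2' i = g2 a b c i := by
    intro i
    induction i with
    | zero => intro _; exact E20
    | succ i ih =>
      intro hi
      simp only [passG]; rw [E2S i hi, ih (by omega)]; rfl
  have E3 : ∀ i, i < a.length → dp3.getD i 0 = g2 a b c i := fun i hi => (e3 i hi).trans (G3 i hi)
  have E30 : dp3'.getD 0 0 = g3 a b c d 0 := by
    rw [hdp3', set_getD_zero _ _ (by omega), E3 0 hn]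
    simp [g2, g3]; ring
  have E3S : ∀ i, i + 1 < a.length → dp3'.getD (i + 1) 0 = g2 a b c (i + 1) := by
    intro i hi
    rw [hdp3', set_getD_succ, E3 (i + 1) hi]
  have G4 : ∀ i, i < a.length → passG f4 dp3' i = g3 a b c d i := by
    intro i
    induction i with
    | zero => intro _; exact E30
    | succ i ih =>
      intro hi
      simp only [passG]; rw [E3S i hi, ih (by omega)]; rfl
  have E4 : dp4.getD (a.length - 1) 0 = g3 a b c d (a.length - 1) :=
    (e4 _ (by omega)).trans (G4 _ (by omega))
  rw [hform, PySem.List.pyGet?_neg_one, List.getLast?_eq_getElem?, l4,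
    ← List.getD_eq_getElem?_getD, E4]

def stepB (b c d : Int) : Int × Int × Int → Int → Int × Int × Int :=
  fun s x =>
    let b1 := max s.1 (b * x)
    let b2 := max s.2.1 (c * x + b1)
    let b3 := max s.2.2 (d * x + b2)
    (b1, b2, b3)

theorem B_inv (a : List Int) (b c d : Int) (k : Nat) :
    ∀ m : Nat, m + 1 + k = a.length →
    (a.drop (m + 1)).foldl (stepB b c d) (g1 a b m, g2 a b c m, g3 a b c d m) =
      (g1 a b (a.length - 1), g2 a b c (a.length - 1), g3 a b c d (a.length - 1)) := by
  induction k with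
  | zero =>
    intro m hm
    rw [List.drop_eq_nil_of_le (by omega)]
    simp only [List.foldl_nil]
    have : m = a.length - 1 := by omega
    rw [this]
  | succ k ih =>
    intro m hm
    have hlt : m + 1 < a.length := by omega
    rw [List.drop_eq_getElem_cons hlt, List.foldl_cons]
    have hx : a[m + 1] = a.getD (m + 1) 0 := by
      rw [List.getD_eq_getElem?_getD, List.getElem?_eq_getElem hlt, Option.getD_some]
    have hstep : stepB b c d (g1 a b m, g2 a b c m, g3 a b c d m) a[m + 1] =
        (g1 a b (m + 1), g2 a b c (m + 1), g3 a b c d (m + 1)) := by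
      have h1 : max (g1 a b m) (b * a.getD (m + 1) 0) = g1 a b (m + 1) := by
        rw [max_comm]; rfl
      have h2 : max (g2 a b c m) (c * a.getD (m + 1) 0 + g1 a b (m + 1)) = g2 a b c (m + 1) := by
        rw [max_comm]; rfl
      have h3 : max (g3 a b c d m) (d * a.getD (m + 1) 0 + g2 a b c (m + 1)) = g3 a b c d (m + 1) := by
        rw [max_comm]; rfl
      simp only [stepB, hx]
      rw [h1, h2, h3]
    rw [hstep]
    exact ih (m + 1) (by omega)

theorem solve_alt_eq_g3 (a : List Int) (b c d : Int) (h : a ≠ []) :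
    solve_alt a b c d = g3 a b c d (a.length - 1) := by
  have hn : 0 < a.length := List.length_pos_iff.mpr h
  have hform : solve_alt a b c d =
      ((a.drop 1).foldl (stepB b c d) (g1 a b 0, g2 a b c 0, g3 a b c d 0)).2.2 := rfl
  rw [hform, B_inv a b c d (a.length - 1) 0 (by omega)]

-- ===== VERDICT (by name: the statement is the Claim_ definition above) =====
theorem solve_spec : Claim_equal_solve := by
  intro a b c d _ hpre
  unfold Spec_solve
  rw [solve_eq_g3 a b c d hpre, solve_alt_eq_g3 a b c d hpre]
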